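-- pv_equiv track=rewrite | github.com/nyasuto/hive_old | scripts/create_github_pr.py | _extract_changes_summary
-- ===== SOURCE A (Python) =====
-- def _extract_changes_summary(diff_content: str) -> str:
--     """差分から変更サマリーを抽出"""
--     if not diff_content:
--         return "変更内容を取得できませんでした"
--
--     # 簡易的な変更サマリー生成
--     lines = diff_content.split("\n")
--     added_lines = len([line for line in lines if line.startswith("+")])
--     removed_lines = len([line for line in lines if line.startswith("-")])
--
--     summary = f"- **追加行数:** {added_lines}\n"
--     summary += f"- **削除行数:** {removed_lines}\n"
--     summary += f"- **変更ファイル数:** {len([line for line in lines if line.startswith('diff --git')])}"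
--
--     return summary
-- ===== SOURCE B (Python) =====
-- def _extract_changes_summary(diff_content: str) -> str:
--     """差分から変更サマリーを抽出"""
--     if not diff_content:
--         return "変更内容を取得できませんでした"
--
--     added = removed = files = 0
--     for line in diff_content.split("\n"):
--         if line.startswith("+"):
--             added += 1
--         elif line.startswith("-"):
--             removed += 1
--         elif line.startswith("diff --git"):
--             files += 1
--
--     return (
--         f"- **追加行数:** {added}\n"
--         f"- **削除行数:** {removed}\n"
--         f"- **変更ファイル数:** {files}"
--     )
-- ===== Notes on version B (the rewrite author's own statement) =====
-- stated objective: simpler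
-- what changed: Replaces three independent filter scans over the line list with one fused pass that maintains three counters (elif is safe since '+'/'-'/'diff --git' prefixes are mutually exclusive).
import Mathlib
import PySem

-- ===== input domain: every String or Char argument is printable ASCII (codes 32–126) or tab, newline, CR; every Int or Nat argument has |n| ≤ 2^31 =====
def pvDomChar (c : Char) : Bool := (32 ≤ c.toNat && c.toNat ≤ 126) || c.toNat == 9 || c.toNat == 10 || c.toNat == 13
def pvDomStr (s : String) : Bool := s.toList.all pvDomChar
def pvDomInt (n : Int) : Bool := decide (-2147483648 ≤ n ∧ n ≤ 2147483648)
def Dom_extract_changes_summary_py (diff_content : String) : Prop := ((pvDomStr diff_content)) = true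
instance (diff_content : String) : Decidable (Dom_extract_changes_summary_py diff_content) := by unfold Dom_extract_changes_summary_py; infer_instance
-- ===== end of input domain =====

-- B fuses A's three filter scans over the lines into one pass maintaining three counters; objective: simpler, same cost.

-- ===== PORT A =====
def extract_changes_summary_py (diff_content : String) : String :=
  if diff_content = "" then "変更内容を取得できませんでした"
  else
    let lines := PySem.Chars.splitOn diff_content.toList "\n".toList
    let added_lines := (lines.filter (fun l => PySem.Chars.startswith l "+".toList)).length
    let removed_lines := (lines.filter (fun l => PySem.Chars.startswith l "-".toList)).length
    let summary := "- **追加行数:** " ++ PySem.Int.toStr (added_lines : Int) ++ "\n"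
    let summary := summary ++ "- **削除行数:** " ++ PySem.Int.toStr (removed_lines : Int) ++ "\n"
    summary ++ "- **変更ファイル数:** " ++
      PySem.Int.toStr (((lines.filter (fun l => PySem.Chars.startswith l "diff --git".toList)).length : Int))

-- ===== PORT B =====
def extract_changes_summary_py_alt (diff_content : String) : String :=
  if diff_content = "" then "変更内容を取得できませんでした"
  else
    let c := (PySem.Chars.splitOn diff_content.toList "\n".toList).foldl
      (fun (acc : Int × Int × Int) line =>
        if PySem.Chars.startswith line "+".toList then (acc.1 + 1, acc.2.1, acc.2.2)
        else if PySem.Chars.startswith line "-".toList then (acc.1, acc.2.1 + 1, acc.2.2)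
        else if PySem.Chars.startswith line "diff --git".toList then (acc.1, acc.2.1, acc.2.2 + 1)
        else acc) (0, 0, 0)
    "- **追加行数:** " ++ PySem.Int.toStr c.1 ++ "\n" ++
    "- **削除行数:** " ++ PySem.Int.toStr c.2.1 ++ "\n" ++
    "- **変更ファイル数:** " ++ PySem.Int.toStr c.2.2

-- ===== PRECONDITION & SPEC =====
def Spec_extract_changes_summary_py (diff_content : String) (out : String) : Prop := out = extract_changes_summary_py_alt diff_content
instance (diff_content : String) (out : String) : Decidable (Spec_extract_changes_summary_py diff_content out) := by unfold Spec_extract_changes_summary_py; infer_instance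

-- ===== CLAIM (what is proved, stated in full; the proofs are below) =====
def Claim_equal_extract_changes_summary_py : Prop := ∀ (diff_content : String), Dom_extract_changes_summary_py diff_content → Spec_extract_changes_summary_py diff_content (extract_changes_summary_py diff_content)

-- ===== LEMMAS AND PROOFS =====

-- A line starting with "diff --git" starts with 'd', hence not with "+" or "-".
lemma startswith_diff_not_plus (l : List Char) (h : PySem.Chars.startswith l ['d','i','f','f',' ','-','-','g','i','t'] = true) :
    PySem.Chars.startswith l ['+'] = false ∧ PySem.Chars.startswith l ['-'] = false := by
  rw [PySem.Chars.startswith_iff] at h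
  obtain ⟨t, ht⟩ := h
  subst ht
  constructor
  all_goals
    rw [Bool.eq_false_iff]
    intro hp
    rw [PySem.Chars.startswith_iff] at hp
    obtain ⟨t', ht'⟩ := hp
    simp at ht'

-- "+" and "-" prefixes are mutually exclusive (different first character).
lemma startswith_plus_not_minus (l : List Char) (h : PySem.Chars.startswith l ['+'] = true) :
    PySem.Chars.startswith l ['-'] = false := by
  rw [PySem.Chars.startswith_iff] at h
  obtain ⟨t, ht⟩ := h
  subst ht
  rw [Bool.eq_false_iff]
  intro hp
  rw [PySem.Chars.startswith_iff] at hp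
  obtain ⟨t', ht'⟩ := hp
  simp at ht'

lemma fold_counts (ls : List (List Char)) (a r d : Int) :
    ls.foldl (fun (acc : Int × Int × Int) line =>
        if PySem.Chars.startswith line "+".toList then (acc.1 + 1, acc.2.1, acc.2.2)
        else if PySem.Chars.startswith line "-".toList then (acc.1, acc.2.1 + 1, acc.2.2)
        else if PySem.Chars.startswith line "diff --git".toList then (acc.1, acc.2.1, acc.2.2 + 1)
        else acc) (a, r, d)
    = (a + (ls.filter (fun l => PySem.Chars.startswith l "+".toList)).length,
       r + (ls.filter (fun l => PySem.Chars.startswith l "-".toList)).length,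
       d + (ls.filter (fun l => PySem.Chars.startswith l "diff --git".toList)).length) := by
  simp only [show ("+" : String).toList = ['+'] from rfl,
             show ("-" : String).toList = ['-'] from rfl,
             show ("diff --git" : String).toList = ['d','i','f','f',' ','-','-','g','i','t'] from rfl]
  induction ls generalizing a r d with
  | nil => simp
  | cons x xs ih =>
    simp only [List.foldl_cons, List.filter_cons]
    by_cases hp : PySem.Chars.startswith x ['+'] = true
    · have hnd : PySem.Chars.startswith x ['d','i','f','f',' ','-','-','g','i','t'] = false := by
        by_contra hc
        simp only [Bool.not_eq_false] at hc
        rw [(startswith_diff_not_plus x hc).1] at hp; exact Bool.false_ne_true hp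
      have hnm := startswith_plus_not_minus x hp
      simp only [hp, hnm, hnd, if_true, Bool.false_eq_true, if_false, ih]
      simp [Prod.ext_iff]; omega
    · by_cases hm : PySem.Chars.startswith x ['-'] = true
      · have hnd : PySem.Chars.startswith x ['d','i','f','f',' ','-','-','g','i','t'] = false := by
          by_contra hc
          simp only [Bool.not_eq_false] at hc
          rw [(startswith_diff_not_plus x hc).2] at hm; exact Bool.false_ne_true hm
        simp only [hp, hm, hnd, if_true, Bool.false_eq_true, if_false, ih]
        simp [hp, Prod.ext_iff]; omega
      · by_cases hd : PySem.Chars.startswith x ['d','i','f','f',' ','-','-','g','i','t'] = true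
        · simp only [hp, hm, hd, if_true, Bool.false_eq_true, if_false, ih]
          simp [hp, hm, Prod.ext_iff]; omega
        · simp only [ih]
          simp [hp, hm, hd]

-- ===== VERDICT (by name: the statement is the Claim_ definition above) =====
theorem extract_changes_summary_py_spec : Claim_equal_extract_changes_summary_py := by
  intro d _
  unfold Spec_extract_changes_summary_py extract_changes_summary_py extract_changes_summary_py_alt
  by_cases h : d = ""
  · simp [h]
  · simp only [h, if_false, fold_counts, zero_add]
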